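-- pv_equiv track=rewrite | github.com/hakituo/xiaoyou-core | core/tools/study/common/utils.py | highlight_errors
-- ===== SOURCE A (Python) =====
-- from typing import List, Dict, Any, Tuple
--
-- def compare_strings(source: str, target: str) -> Tuple[int, List[Tuple[int, str, str]]]:
--     """
--     逐字对比两个字符串，返回错误数量和错误位置详情
--
--     Args:
--         source: 源字符串（正确答案）
--         target: 目标字符串（用户输入）
--
--     Returns:
--         Tuple[int, List[Tuple[int, str, str]]]: (错误数量, 错误详情列表)
--         错误详情格式: (位置索引, 正确字符, 用户输入字符)
--     """
--     errors = []
--     max_len = max(len(source), len(target))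
--
--     for i in range(max_len):
--         if i >= len(source):
--             errors.append((i, "", target[i]))
--         elif i >= len(target):
--             errors.append((i, source[i], ""))
--         elif source[i] != target[i]:
--             errors.append((i, source[i], target[i]))
--
--     return len(errors), errors
--
-- def highlight_errors(source: str, target: str) -> str:
--     """
--     高亮显示错误字符
--
--     Args:
--         source: 源字符串（正确答案）
--         target: 目标字符串（用户输入）
--
--     Returns:
--         str: 高亮后的字符串，错误字符用【】包裹
--     """
--     _, errors = compare_strings(source, target)
--     result = list(target)
--
--     # 从后往前插入高亮标记，避免索引偏移
--     for i, correct_char, user_char in sorted(errors, reverse=True):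
--         if i < len(result):
--             result[i] = f"【{result[i]}】"
--         else:
--             result.append(f"【{user_char}】")
--
--     return "".join(result)
-- ===== SOURCE B (Python) =====
-- def highlight_errors(source: str, target: str) -> str:
--     """Single forward pass: emit each target char, wrapping mismatches/extras in 【】."""
--     parts = []
--     for i in range(max(len(source), len(target))):
--         if i >= len(source):
--             parts.append(f"【{target[i]}】")
--         elif i >= len(target):
--             parts.append("【】")
--         elif source[i] != target[i]:
--             parts.append(f"【{target[i]}】")
--         else:
--             parts.append(target[i])
--     return "".join(parts)
-- ===== Notes on version B (the rewrite author's own statement) =====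
-- stated objective: simpler
-- what changed: Replaces the two-phase pipeline (build an errors list, sorted(errors, reverse=True), then insert highlight marks back-to-front with in-place assignment/append) by a single forward pass that emits each position's token (plain char or 【】-wrapped) and joins them.
-- intended difference: When source is at least 2 chars longer than target, A's back-to-front insertion wraps its own freshly appended 【】 markers (and can wrap correct trailing characters), returning nested groups like 'ab【【】】'; B returns one 【】 per missing character ('ab【】【】'), the intended highlight. — e.g. on highlight_errors("abcd", "ab"): A returns "ab【【】】", B returns "ab【】【】"
import Mathlib
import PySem

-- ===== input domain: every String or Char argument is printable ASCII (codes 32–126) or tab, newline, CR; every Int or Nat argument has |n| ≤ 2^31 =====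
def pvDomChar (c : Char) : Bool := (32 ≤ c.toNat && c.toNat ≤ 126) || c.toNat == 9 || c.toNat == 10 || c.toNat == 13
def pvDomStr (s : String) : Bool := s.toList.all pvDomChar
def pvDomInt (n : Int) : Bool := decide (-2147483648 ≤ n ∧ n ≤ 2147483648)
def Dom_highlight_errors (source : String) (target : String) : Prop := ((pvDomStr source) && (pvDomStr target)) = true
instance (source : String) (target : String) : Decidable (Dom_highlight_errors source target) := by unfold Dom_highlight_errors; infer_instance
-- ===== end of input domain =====

-- B replaces A's compute-errors / sort-descending / insert-backwards pipeline by one forward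
-- pass emitting tokens in order (objective: simpler); on sources ≥ 2 chars longer than target
-- the two differ (see D_ below): A's backwards insertion nests its own markers, B does not.

-- ===== PORT A =====
-- strings are carried as char lists (PySem.Chars style); String.ofList at the boundary
def compare_strings (source : String) (target : String) :
    Int × List (Int × List Char × List Char) :=
  let s := source.toList
  let t := target.toList
  let errors := (PySem.List.pyRange 0 ((max s.length t.length : Nat) : Int)).foldl
    (fun errors i =>
      if (s.length : Int) ≤ i then
        errors ++ [(i, ([] : List Char), [PySem.List.pyGetD t i ' '])]
      else if (t.length : Int) ≤ i then
        errors ++ [(i, [PySem.List.pyGetD s i ' '], ([] : List Char))]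
      else if PySem.List.pyGetD s i ' ' ≠ PySem.List.pyGetD t i ' ' then
        errors ++ [(i, [PySem.List.pyGetD s i ' '], [PySem.List.pyGetD t i ' '])]
      else errors) []
  ((errors.length : Int), errors)

def highlight_errors (source : String) (target : String) : String :=
  let errors := (compare_strings source target).2
  let result := target.toList.map (fun c => [c])
  -- sorted(errors, reverse=True): Python compares the tuples lexicographically; the index
  -- components are pairwise distinct, so sorting by the index alone is exact here
  let final := (PySem.List.sorted errors (fun e => e.1) true).foldl
    (fun result e =>
      -- result[i] = f"【{result[i]}】"  /  result.append(f"【{user_char}】")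
      if e.1 < (result.length : Int) then
        result.set e.1.toNat ('【' :: (PySem.List.pyGetD result e.1 [] ++ ['】']))
      else
        result ++ ['【' :: (e.2.2 ++ ['】'])]) result
  String.ofList final.flatten  -- "".join(result)

-- ===== PORT B =====
def highlight_errors_alt (source : String) (target : String) : String :=
  let s := source.toList
  let t := target.toList
  let parts := (PySem.List.pyRange 0 ((max s.length t.length : Nat) : Int)).foldl
    (fun parts i =>
      if (s.length : Int) ≤ i then parts ++ [['【', PySem.List.pyGetD t i ' ', '】']]
      else if (t.length : Int) ≤ i then parts ++ [['【', '】']]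
      else if PySem.List.pyGetD s i ' ' ≠ PySem.List.pyGetD t i ' ' then
        parts ++ [['【', PySem.List.pyGetD t i ' ', '】']]
      else parts ++ [[PySem.List.pyGetD t i ' ']]) []
  String.ofList parts.flatten  -- "".join(parts)

-- ===== PRECONDITION & SPEC =====
-- When source is at least 2 chars longer than target, A's back-to-front insertion wraps its own
-- freshly appended 【】 markers (and can wrap correct trailing characters), returning nested
-- groups like "ab【【】】"; B returns one 【】 per missing character ("ab【】【】"), the intended highlight.
def D_highlight_errors (source : String) (target : String) : Prop :=
  target.toList.length + 2 ≤ source.toList.length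
instance (source : String) (target : String) : Decidable (D_highlight_errors source target) := by
  unfold D_highlight_errors; infer_instance

def Spec_highlight_errors (source : String) (target : String) (out : String) : Prop :=
  ¬ D_highlight_errors source target → out = highlight_errors_alt source target
instance (source : String) (target : String) (out : String) : Decidable (Spec_highlight_errors source target out) := by unfold Spec_highlight_errors; infer_instance

def pvDiffWitness_highlight_errors : String × String := ("abcd", "ab")
def pvDiffWitnessOut_highlight_errors : String × String := ("ab【【】】", "ab【】【】")

-- ===== CLAIM (what is proved, stated in full; the proofs are below) =====
def Claim_unchanged_highlight_errors : Prop := ∀ (source : String) (target : String), Dom_highlight_errors source target → Spec_highlight_errors source target (highlight_errors source target)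
def Claim_changed_highlight_errors : Prop := Dom_highlight_errors (pvDiffWitness_highlight_errors.1) (pvDiffWitness_highlight_errors.2) ∧ D_highlight_errors (pvDiffWitness_highlight_errors.1) (pvDiffWitness_highlight_errors.2) ∧ highlight_errors (pvDiffWitness_highlight_errors.1) (pvDiffWitness_highlight_errors.2) = pvDiffWitnessOut_highlight_errors.1 ∧ highlight_errors_alt (pvDiffWitness_highlight_errors.1) (pvDiffWitness_highlight_errors.2) = pvDiffWitnessOut_highlight_errors.2 ∧ pvDiffWitnessOut_highlight_errors.1 ≠ pvDiffWitnessOut_highlight_errors.2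

-- ===== LEMMAS AND PROOFS =====

-- B's token at position i
def pvTok (s t : List Char) (i : Int) : List Char :=
  if (s.length : Int) ≤ i then ['【', PySem.List.pyGetD t i ' ', '】']
  else if (t.length : Int) ≤ i then ['【', '】']
  else if PySem.List.pyGetD s i ' ' ≠ PySem.List.pyGetD t i ' ' then
    ['【', PySem.List.pyGetD t i ' ', '】']
  else [PySem.List.pyGetD t i ' ']


-- A's error predicate and error entry at position i
def pvCondB (s t : List Char) (i : Int) : Bool :=
  decide ((s.length : Int) ≤ i) || decide ((t.length : Int) ≤ i) ||
    decide (PySem.List.pyGetD s i ' ' ≠ PySem.List.pyGetD t i ' ')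

def pvErr (s t : List Char) (i : Int) : Int × List Char × List Char :=
  if (s.length : Int) ≤ i then (i, ([] : List Char), [PySem.List.pyGetD t i ' '])
  else if (t.length : Int) ≤ i then (i, [PySem.List.pyGetD s i ' '], ([] : List Char))
  else (i, [PySem.List.pyGetD s i ' '], [PySem.List.pyGetD t i ' '])

theorem pvErr_fst (s t : List Char) (i : Int) : (pvErr s t i).1 = i := by
  unfold pvErr; split_ifs <;> rfl

-- B unfolded: one token per index of range(max(len(s),len(t)))
theorem pv_alt_eq (source target : String) :
    highlight_errors_alt source target =
      String.ofList (((PySem.List.pyRange 0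
        ((max source.toList.length target.toList.length : Nat) : Int)).map
          (pvTok source.toList target.toList)).flatten) := by
  have h : (fun (parts : List (List Char)) (i : Int) =>
      if (source.toList.length : Int) ≤ i then
        parts ++ [['【', PySem.List.pyGetD target.toList i ' ', '】']]
      else if (target.toList.length : Int) ≤ i then parts ++ [['【', '】']]
      else if PySem.List.pyGetD source.toList i ' ' ≠ PySem.List.pyGetD target.toList i ' ' then
        parts ++ [['【', PySem.List.pyGetD target.toList i ' ', '】']]
      else parts ++ [[PySem.List.pyGetD target.toList i ' ']])
      = fun parts i => parts ++ [pvTok source.toList target.toList i] := by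
    funext parts i; simp only [pvTok]; split_ifs <;> rfl
  simp only [highlight_errors_alt]
  rw [h, PySem.List.foldl_append_singleton_eq_map]
  simp

-- A's errors list is the filtered index range mapped through pvErr
theorem pv_errors_eq (source target : String) :
    (compare_strings source target).2 =
      ((PySem.List.pyRange 0 ((max source.toList.length target.toList.length : Nat) : Int)).filter
        (pvCondB source.toList target.toList)).map (pvErr source.toList target.toList) := by
  have h : (fun (errors : List (Int × List Char × List Char)) (i : Int) =>
      if (source.toList.length : Int) ≤ i then
        errors ++ [(i, ([] : List Char), [PySem.List.pyGetD target.toList i ' '])]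
      else if (target.toList.length : Int) ≤ i then
        errors ++ [(i, [PySem.List.pyGetD source.toList i ' '], ([] : List Char))]
      else if PySem.List.pyGetD source.toList i ' ' ≠ PySem.List.pyGetD target.toList i ' ' then
        errors ++ [(i, [PySem.List.pyGetD source.toList i ' '],
          [PySem.List.pyGetD target.toList i ' '])]
      else errors)
      = fun errors i =>
          if pvCondB source.toList target.toList i then
            errors ++ [pvErr source.toList target.toList i] else errors := by
    funext errors i
    by_cases h1 : (source.length : Int) ≤ i <;>
      by_cases h2 : (target.length : Int) ≤ i <;>
        by_cases h3 : PySem.List.pyGetD source.toList i ' ' ≠ PySem.List.pyGetD target.toList i ' ' <;>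
          simp [pvCondB, pvErr, h1, h2, h3]
  simp only [compare_strings]
  rw [h, PySem.List.foldl_append_if]
  simp

-- the map of fst over the errors list is the filtered range itself
theorem pv_errors_fst (s t : List Char) (l : List Int) :
    ((l.filter (pvCondB s t)).map (pvErr s t)).map (fun e => e.1) = l.filter (pvCondB s t) := by
  rw [List.map_map]
  have : ((fun e : Int × List Char × List Char => e.1) ∘ pvErr s t) = id := by
    funext i; simp [Function.comp, pvErr_fst]
  rw [this, List.map_id]

-- the descending sort of the strictly fst-increasing errors list is its reverse
theorem pv_sorted_eq_reverse (s t : List Char) (l : List Int) (hl : l.Pairwise (· < ·)) :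
    PySem.List.sorted ((l.filter (pvCondB s t)).map (pvErr s t)) (fun e => e.1) true
      = ((l.filter (pvCondB s t)).map (pvErr s t)).reverse := by
  apply PySem.List.sorted_rev_eq_of_perm_of_pairwise_gt
  · exact List.reverse_perm _
  · rw [List.pairwise_reverse]
    refine List.Pairwise.map _ ?_ (hl.filter _)
    intro a b hab
    simpa [pvErr_fst] using hab

theorem pv_mapIdx_id {α : Type} (l : List α) : List.mapIdx (fun _ x => x) l = l := by
  apply List.ext_getElem <;> simp

-- the insertion fold of A over index-distinct in-range errors only wraps those positions
theorem pv_fold_sets (es : List (Int × List Char × List Char)) :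
    ∀ (r : List (List Char)),
      (∀ e ∈ es, 0 ≤ e.1 ∧ e.1 < (r.length : Int)) →
      (es.map (fun e => e.1)).Nodup →
      es.foldl (fun result e =>
        if e.1 < (result.length : Int) then
          result.set e.1.toNat ('【' :: (PySem.List.pyGetD result e.1 [] ++ ['】']))
        else result ++ ['【' :: (e.2.2 ++ ['】'])]) r
      = r.mapIdx (fun j x =>
          if (j : Int) ∈ es.map (fun e => e.1) then '【' :: (x ++ ['】']) else x) := by
  induction es with
  | nil => intro r _ _; simp [pv_mapIdx_id]
  | cons e es ih =>
    intro r hb hnd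
    have he0 : 0 ≤ e.1 := (hb e (List.mem_cons_self)).1
    have helt : e.1 < (r.length : Int) := (hb e (List.mem_cons_self)).2
    have hk : e.1.toNat < r.length := by omega
    have hset : PySem.List.pyGetD r e.1 [] = r[e.1.toNat] :=
      PySem.List.pyGetD_eq_getElem r [] he0 helt
    rw [List.foldl_cons, if_pos helt, hset]
    rw [ih _ (by intro e' he'; simpa using (hb e' (List.mem_cons_of_mem _ he'))) hnd.of_cons]
    have hhd : e.1 ∉ es.map (fun e => e.1) := (List.nodup_cons.mp hnd).1
    apply List.ext_getElem
    · simp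
    · intro j hj1 hj2
      by_cases hje : e.1.toNat = j
      · subst hje
        have hji : ((e.1.toNat : Nat) : Int) = e.1 := Int.toNat_of_nonneg he0
        rw [List.getElem_mapIdx, List.getElem_mapIdx, List.getElem_set, if_pos rfl]
        simp only [List.map_cons, List.mem_cons, hji]
        simp [hhd]
      · have hji : (j : Int) ≠ e.1 := by omega
        rw [List.getElem_mapIdx, List.getElem_mapIdx, List.getElem_set, if_neg hje]
        simp only [List.map_cons, List.mem_cons]
        by_cases hc : (j : Int) ∈ List.map (fun e => e.1) es
        · rw [if_pos hc, if_pos (Or.inr hc)]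
        · rw [if_neg hc, if_neg (by tauto)]



-- B's token for a position inside target
theorem pv_tok_low (s t : List Char) (j : Nat) (hj : j < t.length) :
    (if (j : Int) ∈ (PySem.List.pyRange 0 (t.length : Int)).filter (pvCondB s t) then
      '【' :: ([t[j]] ++ ['】']) else [t[j]]) = pvTok s t (j : Int) := by
  have hget : PySem.List.pyGetD t (j : Int) ' ' = t[j] :=
    PySem.List.pyGetD_eq_getElem t ' ' (by positivity) (by exact_mod_cast hj)
  have h2 : ¬ (t.length : Int) ≤ (j : Int) := by exact_mod_cast Nat.not_le.mpr hj
  have hmem : (j : Int) ∈ PySem.List.pyRange 0 (t.length : Int) :=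
    PySem.List.mem_pyRange_one.mpr ⟨by positivity, by exact_mod_cast hj⟩
  by_cases h1 : (s.length : Int) ≤ (j : Int)
  · have hcond : pvCondB s t (j : Int) = true := by
      simp only [pvCondB, Bool.or_eq_true, decide_eq_true_eq]; tauto
    rw [if_pos (List.mem_filter.mpr ⟨hmem, hcond⟩)]
    simp only [pvTok, if_pos h1, hget]
    rfl
  · by_cases h3 : PySem.List.pyGetD s (j : Int) ' ' ≠ PySem.List.pyGetD t (j : Int) ' '
    · have hcond : pvCondB s t (j : Int) = true := by
        simp only [pvCondB, Bool.or_eq_true, decide_eq_true_eq]; tauto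
      rw [if_pos (List.mem_filter.mpr ⟨hmem, hcond⟩)]
      simp only [pvTok, if_neg h1, if_neg h2]
      rw [if_pos h3, hget]
      rfl
    · have hcond : ¬ pvCondB s t (j : Int) = true := by
        simp only [pvCondB, Bool.or_eq_true, decide_eq_true_eq]; tauto
      rw [if_neg (fun hmm => hcond (List.mem_filter.mp hmm).2)]
      simp only [pvTok, if_neg h1, if_neg h2]
      rw [if_neg h3, hget]

-- A's backwards insertion over the in-target errors = B's forward tokens, any tail untouched
theorem pv_low (s t : List Char) (rest : List (List Char)) :
    ((((PySem.List.pyRange 0 (t.length : Int)).filter (pvCondB s t)).map (pvErr s t)).reverse).foldl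
      (fun result e =>
        if e.1 < (result.length : Int) then
          result.set e.1.toNat ('【' :: (PySem.List.pyGetD result e.1 [] ++ ['】']))
        else result ++ ['【' :: (e.2.2 ++ ['】'])])
      (t.map (fun c => [c]) ++ rest)
    = (PySem.List.pyRange 0 (t.length : Int)).map (pvTok s t) ++ rest := by
  have hfstrev : ((((PySem.List.pyRange 0 (t.length : Int)).filter (pvCondB s t)).map
      (pvErr s t)).reverse).map (fun e => e.1)
      = ((PySem.List.pyRange 0 (t.length : Int)).filter (pvCondB s t)).reverse := by
    rw [List.map_reverse, pv_errors_fst]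
  have hb : ∀ e ∈ (((PySem.List.pyRange 0 (t.length : Int)).filter (pvCondB s t)).map
      (pvErr s t)).reverse, 0 ≤ e.1 ∧ e.1 < ((t.map (fun c => [c]) ++ rest).length : Int) := by
    intro e he
    rw [List.mem_reverse] at he
    obtain ⟨i, hi, rfl⟩ := List.mem_map.mp he
    have h01 := PySem.List.mem_pyRange_one.mp (List.mem_filter.mp hi).1
    have hlen : ((t.map (fun c => [c]) ++ rest).length : Int) = (t.length : Int) + rest.length := by
      simp
    rw [pvErr_fst, hlen]
    omega
  have hnd : (((((PySem.List.pyRange 0 (t.length : Int)).filter (pvCondB s t)).map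
      (pvErr s t)).reverse).map (fun e => e.1)).Nodup := by
    rw [hfstrev]
    exact List.nodup_reverse.mpr (List.Nodup.filter _ (PySem.List.nodup_pyRange_one _ _))
  rw [pv_fold_sets _ _ hb hnd, List.mapIdx_append]
  have hnotmem : ∀ (j : Nat), t.length ≤ j →
      ((j : Int) ∉ ((((PySem.List.pyRange 0 (t.length : Int)).filter (pvCondB s t)).map
        (pvErr s t)).reverse).map (fun e => e.1)) := by
    intro j hj
    rw [hfstrev, List.mem_reverse, List.mem_filter]
    intro hmem
    have := PySem.List.mem_pyRange_one.mp hmem.1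
    omega
  congr 1
  · apply List.ext_getElem
    · simp [PySem.List.length_pyRange_one]
    · intro j hj1 hj2
      have hjt : j < t.length := by simpa using hj1
      rw [List.getElem_mapIdx, List.getElem_map, List.getElem_map,
        PySem.List.getElem_pyRange_one]
      simp only [hfstrev, List.mem_reverse, List.mem_filter, zero_add]
      have := pv_tok_low s t j hjt
      rw [← this]
      simp [List.mem_filter]
  · apply List.ext_getElem
    · simp
    · intro j hj1 hj2
      rw [List.getElem_mapIdx]
      rw [if_neg (by simpa using hnotmem (j + t.length) (by omega))]

-- ===== VERDICT (by name: the statement is the Claim_ definition above) =====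
theorem highlight_errors_spec : Claim_unchanged_highlight_errors := by
  intro source target _ hD
  simp only [D_highlight_errors] at hD
  rw [pv_alt_eq]
  show highlight_errors source target = _
  simp only [highlight_errors, pv_errors_eq]
  rw [pv_sorted_eq_reverse source.toList target.toList _ (PySem.List.pairwise_lt_pyRange_one _ _)]
  rcases Nat.le_total source.toList.length target.toList.length with hle | hge
  · -- source not longer than target: every error wraps an existing position
    rw [Nat.max_eq_right hle]
    have h := pv_low source.toList target.toList []
    simp only [List.append_nil] at h
    rw [h]
  · -- source not longer, or source exactly one char longer
    by_cases hle : source.toList.length ≤ target.toList.length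
    · rw [Nat.max_eq_right hle]
      have h := pv_low source.toList target.toList []
      simp only [List.append_nil] at h
      rw [h]
    -- source exactly one char longer: the extra error appends a single 【】, then as before
    have hex : source.toList.length = target.toList.length + 1 := by omega
    rw [Nat.max_eq_left (by omega), hex]
    have hsplit : PySem.List.pyRange 0 (((target.toList.length + 1 : Nat)) : Int)
        = PySem.List.pyRange 0 (target.toList.length : Int) ++ [(target.toList.length : Int)] := by
      push_cast
      exact PySem.List.pyRange_one_succ_right (by positivity)
    have hns : ¬ ((source.toList.length : Int) ≤ (target.toList.length : Int)) := by
      exact_mod_cast Nat.not_le.mpr (by omega)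
    have hc : pvCondB source.toList target.toList (target.toList.length : Int) = true := by
      simp only [pvCondB, Bool.or_eq_true, decide_eq_true_eq]
      exact Or.inl (Or.inr (le_refl _))
    have hlast : pvErr source.toList target.toList (target.toList.length : Int)
        = ((target.toList.length : Int),
           [PySem.List.pyGetD source.toList (target.toList.length : Int) ' '], []) := by
      simp only [pvErr, if_neg hns, if_pos (le_refl (target.toList.length : Int))]
    have hfl : List.filter (pvCondB source.toList target.toList)
        [(target.toList.length : Int)] = [(target.toList.length : Int)] := by
      rw [List.filter_cons, if_pos hc, List.filter_nil]
    have htok : pvTok source.toList target.toList (target.toList.length : Int) = ['【', '】'] := by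
      simp only [pvTok, if_neg hns, if_pos (le_refl (target.toList.length : Int))]
    rw [hsplit, List.filter_append, hfl, List.map_append, List.map_append,
      List.map_cons, List.map_nil, hlast]
    simp only [List.reverse_append, List.reverse_cons, List.reverse_nil, List.nil_append,
      List.singleton_append, List.foldl_cons]
    rw [if_neg (by simp)]
    rw [pv_low source.toList target.toList [['【', '】']], List.map_cons, List.map_nil, htok]

theorem highlight_errors_changed : Claim_changed_highlight_errors := by
  unfold Claim_changed_highlight_errors; decide
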